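-- pv_equiv track=rewrite | github.com/tech-writing-lab/style-guide | tools/html2md/markdown_tools.py | convert_underline_headers_to_hash
-- ===== SOURCE A (Python) =====
-- def convert_underline_headers_to_hash(markdown_text: str) -> str:
--     """
--     將 Markdown 文本中以連續破折號 (-) 表示的二級標題轉換為 ## 格式。
--     此函式使用逐行解析，以確保能處理更多邊界情況。
--
--     例如：
--     Long and short versions of a word
--     ---------------------------------
--
--     轉換為：
--     ## Long and short versions of a word
--
--     Args:
--         markdown_text (str): 輸入的 Markdown 文本
--
--     Returns:
--         str: 轉換後的 Markdown 文本
--     """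
--     lines = markdown_text.splitlines()
--     result_lines = []
--     i = 0
--
--     while i < len(lines):
--         current_line = lines[i]
--
--         # 檢查是否有下一行
--         if i + 1 < len(lines):
--             next_line = lines[i + 1]
--
--             # 檢查下一行是否全部由破折號組成且長度大於等於3
--             if (next_line.strip() and
--                 all(c == '-' for c in next_line.strip()) and
--                 len(next_line.strip()) >= 3 and
--                 current_line.strip()):  # 確保標題行不為空
--
--                 # 將標題行轉換為 ## 格式
--                 header_text = current_line.strip()
--                 result_lines.append(f"## {header_text}")
--
--                 # 跳過破折號行
--                 i += 2
--                 continue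
--
--         # 如果不是標題格式，直接添加當前行
--         result_lines.append(current_line)
--         i += 1
--
--     return '\n'.join(result_lines)
-- ===== SOURCE B (Python) =====
-- def convert_underline_headers_to_hash(markdown_text: str) -> str:
--     # Two-stage algorithm: first compute a "consumed" mask marking which
--     # underline lines are eaten by the preceding title, then render each
--     # surviving line from that mask (instead of A's single lookahead loop).
--     lines = markdown_text.splitlines()
--     n = len(lines)
--     consumed = [False] * n
--     for i in range(1, n):
--         s = lines[i].strip()
--         consumed[i] = (not consumed[i - 1]) and lines[i - 1].strip() != "" \
--             and len(s) >= 3 and s == "-" * len(s)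
--     out = []
--     for i in range(n):
--         if consumed[i]:
--             continue
--         if i + 1 < n and consumed[i + 1]:
--             out.append("## " + lines[i].strip())
--         else:
--             out.append(lines[i])
--     return "\n".join(out)
-- ===== Notes on version B (the rewrite author's own statement) =====
-- stated objective: alternative
-- what changed: Replaces A's single lookahead loop (merge title+dashes as it scans) by a two-stage algorithm: a first scan computes a boolean mask marking which underline lines are eaten, then a second pass renders each surviving line from that mask.
import Mathlib
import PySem

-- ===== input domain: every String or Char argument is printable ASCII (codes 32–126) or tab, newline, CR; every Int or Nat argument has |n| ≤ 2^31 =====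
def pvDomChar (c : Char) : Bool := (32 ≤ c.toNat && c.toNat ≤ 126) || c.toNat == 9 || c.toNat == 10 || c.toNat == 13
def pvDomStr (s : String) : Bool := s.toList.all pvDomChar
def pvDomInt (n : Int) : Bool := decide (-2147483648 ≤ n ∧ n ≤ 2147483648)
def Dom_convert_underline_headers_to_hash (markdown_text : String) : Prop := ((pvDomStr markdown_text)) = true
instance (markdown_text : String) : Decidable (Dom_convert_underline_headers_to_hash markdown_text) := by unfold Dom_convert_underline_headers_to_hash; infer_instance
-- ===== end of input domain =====

-- B replaces A's single lookahead scan by a two-stage algorithm (compute a consumed-underline mask, then render from it); same results, similar cost (objective: alternative).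
-- ===== PORT A =====
def pvCondA (current next : String) : Bool :=
  (PySem.Str.strip next != "")
    && (PySem.Str.strip next).toList.all (fun ch => ch == '-')
    && decide (3 ≤ (PySem.Str.strip next).toList.length)
    && (PySem.Str.strip current != "")

def pvLoopA : List String → List String
  | [] => []
  | [c] => [c]
  | c :: n :: rest =>
    if pvCondA c n then
      ("## " ++ PySem.Str.strip c) :: pvLoopA rest
    else
      c :: pvLoopA (n :: rest)

def convert_underline_headers_to_hash (markdown_text : String) : String :=
  PySem.Str.join "\n" (pvLoopA (PySem.Str.splitlines markdown_text))

-- ===== PORT B =====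
-- Source B's underline test: len(s) >= 3 and s == "-" * len(s)
def pvIsUnderline (line : String) : Bool :=
  let s := PySem.Str.strip line
  decide (3 ≤ s.toList.length) && (s == String.ofList (List.replicate s.toList.length '-'))

-- Stage 1 of Source B: the consumed mask; the index loop becomes structural
-- recursion carrying the same state (lines[i-1], consumed[i-1]).
def pvMaskFrom (prev : String) (prevC : Bool) : List String → List Bool
  | [] => []
  | l :: rest =>
    let c := (!prevC) && (PySem.Str.strip prev != "") && pvIsUnderline l
    c :: pvMaskFrom l c rest

def pvMaskTop : List String → List Bool
  | [] => []
  | l :: ls => false :: pvMaskFrom l false ls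

-- Stage 2 of Source B: render lines against the mask (consumed[i+1] = head of cs).
def pvOutB : List String → List Bool → List String
  | [], _ => []
  | l :: ls, [] => l :: pvOutB ls []
  | l :: ls, c :: cs =>
    if c then pvOutB ls cs
    else (if cs.headD false then "## " ++ PySem.Str.strip l else l) :: pvOutB ls cs

def convert_underline_headers_to_hash_alt (markdown_text : String) : String :=
  PySem.Str.join "\n"
    (pvOutB (PySem.Str.splitlines markdown_text) (pvMaskTop (PySem.Str.splitlines markdown_text)))

-- ===== PRECONDITION & SPEC =====
def Spec_convert_underline_headers_to_hash (markdown_text : String) (out : String) : Prop := out = convert_underline_headers_to_hash_alt markdown_text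
instance (markdown_text : String) (out : String) : Decidable (Spec_convert_underline_headers_to_hash markdown_text out) := by unfold Spec_convert_underline_headers_to_hash; infer_instance

-- ===== CLAIM (what is proved, stated in full; the proofs are below) =====
def Claim_equal_convert_underline_headers_to_hash : Prop := ∀ (markdown_text : String), Dom_convert_underline_headers_to_hash markdown_text → Spec_convert_underline_headers_to_hash markdown_text (convert_underline_headers_to_hash markdown_text)

-- ===== LEMMAS AND PROOFS =====

-- A's four-way condition equals B's (strip prev non-empty && is-underline) condition.
lemma pvCond_eq (c n : String) :
    pvCondA c n = ((PySem.Str.strip c != "") && pvIsUnderline n) := by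
  unfold pvCondA pvIsUnderline
  generalize PySem.Str.strip n = s
  rw [Bool.eq_iff_iff]
  simp only [Bool.and_eq_true, bne_iff_ne, ne_eq, decide_eq_true_eq, beq_iff_eq,
    List.all_eq_true]
  constructor
  · rintro ⟨⟨⟨hne, hall⟩, hlen⟩, hc⟩
    refine ⟨hc, ?_, ?_⟩
    · simpa using hlen
    · rw [← String.ofList_toList (s := s)]
      congr 1
      refine List.eq_replicate_iff.mpr ⟨by simp, fun b hb => hall b hb⟩
  · rintro ⟨hc, hlen, hrep⟩
    have htl : s.toList = List.replicate s.toList.length '-' := by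
      conv_lhs => rw [hrep]
      simp
    refine ⟨⟨⟨?_, ?_⟩, ?_⟩, hc⟩
    · intro h; subst h; simp at hlen
    · intro x hx
      rw [htl] at hx
      simp [List.eq_of_mem_replicate hx]
    · simpa using hlen

-- After a consumed underline the mask restarts exactly as at the top.
lemma pvMaskFrom_true (p : String) (ls : List String) :
    pvMaskFrom p true ls = pvMaskTop ls := by
  cases ls with
  | nil => rfl
  | cons l rest => simp [pvMaskFrom, pvMaskTop]

-- Main lemma: the two-stage render equals A's lookahead recursion.
lemma pvOutB_mask_eq (ls : List String) :
    pvOutB ls (pvMaskTop ls) = pvLoopA ls := by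
  induction ls using pvLoopA.induct with
  | case1 => rfl
  | case2 c => rfl
  | case3 c n rest hc ih =>
    rw [pvCond_eq] at hc
    have hm : pvMaskTop (c :: n :: rest) = false :: true :: pvMaskTop rest := by
      simp only [pvMaskTop, pvMaskFrom, Bool.not_false, Bool.true_and, hc, pvMaskFrom_true]
    rw [hm]
    simp only [pvOutB, List.headD_cons, Bool.false_eq_true, if_false, if_true]
    rw [ih, pvLoopA, pvCond_eq, if_pos hc]
  | case4 c n rest hc ih =>
    rw [pvCond_eq] at hc
    have hc' : ((PySem.Str.strip c != "") && pvIsUnderline n) = false := by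
      simpa using hc
    have hm : pvMaskTop (c :: n :: rest) = false :: pvMaskTop (n :: rest) := by
      simp only [pvMaskTop, pvMaskFrom, Bool.not_false, Bool.true_and, hc']
    rw [hm]
    have hm2 : pvMaskTop (n :: rest) = false :: pvMaskFrom n false rest := rfl
    rw [pvOutB, if_neg (by simp), hm2, List.headD_cons, if_neg (by simp), ← hm2, ih]
    rw [pvLoopA, pvCond_eq, if_neg (by simp [hc'])]

-- ===== VERDICT (by name: the statement is the Claim_ definition above) =====
theorem convert_underline_headers_to_hash_spec : Claim_equal_convert_underline_headers_to_hash := by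
  intro s _
  unfold Spec_convert_underline_headers_to_hash convert_underline_headers_to_hash
    convert_underline_headers_to_hash_alt
  rw [pvOutB_mask_eq]
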